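-- pv_equiv track=rewrite | github.com/AnhTran1610/codility | corresponding_fragments/corresponding_fragments.py | solution
-- ===== SOURCE A (Python) =====
-- def solution(A, B):
--     counter = 0
--
--     for i in range(len(A)):
--         subA = A[i]
--         subB = B[i]
--
--         if subA == subB:
--             counter += 1
--
--         for j in range(i + 1, len(A)):
--             if A[j] is not None:
--                 subA += A[j]
--                 subB += B[j]
--
--                 objA = {}
--                 objB = {}
--
--                 for k in range(len(subA)):
--                     objA[subA[k]] = objA.get(subA[k], 0) + 1
--                     objB[subB[k]] = objB.get(subB[k], 0) + 1
--
--                 is_corresponding = all(objA.get(k, 0) == objB.get(k, 0) for k in set(objA.keys()) | set(objB.keys()))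
--
--                 if is_corresponding:
--                     counter += 1
--
--     return counter
-- ===== SOURCE B (Python) =====
-- def solution(A, B):
--     n = len(A)
--     count = 0
--     for i in range(n):
--         if A[i] == B[i]:
--             count += 1
--         btail = "".join(B[i:])
--         diff = {}   # char -> (#occurrences in A[i..j]) - (#occurrences in consumed prefix of btail)
--         bad = 0     # number of characters whose diff entry is nonzero
--         pos = 0     # how many characters of btail have been consumed (= len of A[i..j])
--         for j in range(i, n):
--             for c in A[j]:
--                 v = diff.get(c, 0) + 1
--                 diff[c] = v
--                 if v == 0:
--                     bad -= 1
--                 elif v == 1: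
--                     bad += 1
--             new_pos = pos + len(A[j])
--             for c in btail[pos:new_pos]:
--                 v = diff.get(c, 0) - 1
--                 diff[c] = v
--                 if v == 0:
--                     bad -= 1
--                 elif v == -1:
--                     bad += 1
--             pos = new_pos
--             if j > i and bad == 0:
--                 count += 1
--     return count
-- ===== Notes on version B (the rewrite author's own statement) =====
-- stated objective: faster
-- what changed: Instead of rebuilding two frequency dicts from scratch for every pair (i,j), B keeps one running char-difference dict plus a nonzero-entry counter per start index i, consuming A[j]'s chars and the matching-length prefix of the joined B-tail incrementally, so each pair is checked in O(1) after O(L) updates.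
import Mathlib
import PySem

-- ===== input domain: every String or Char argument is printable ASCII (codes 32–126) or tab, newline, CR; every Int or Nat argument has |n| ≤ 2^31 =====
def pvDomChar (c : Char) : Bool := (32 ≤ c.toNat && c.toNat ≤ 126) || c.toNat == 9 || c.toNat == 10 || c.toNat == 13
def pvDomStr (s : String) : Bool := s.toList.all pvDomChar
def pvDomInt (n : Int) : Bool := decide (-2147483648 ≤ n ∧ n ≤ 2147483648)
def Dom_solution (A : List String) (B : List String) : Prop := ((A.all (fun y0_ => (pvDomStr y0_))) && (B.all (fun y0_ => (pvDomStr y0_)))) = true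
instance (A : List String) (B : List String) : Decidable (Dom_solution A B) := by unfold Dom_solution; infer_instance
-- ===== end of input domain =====

-- B replaces A's per-pair from-scratch frequency dicts by one running char-difference dict with a
-- nonzero-entry counter per start index (objective: faster).

-- ===== PORT A =====
-- Strings are handled as their char lists.  Python's 'if A[j] is not None' is always true for a
-- list of strings and is noted here rather than ported.  'pyGetD subB k …' stands for Python's
-- subB[k], which raises IndexError when out of range: exactly those inputs are excluded by
-- Pre_solution, so inside Pre_ every index is in range and the default is never used.
-- The loop bodies are named helper functions; each is the literal body of A's loops.
def solutionKStep (subA subB : List Char) (o : PySem.Dict Char Int × PySem.Dict Char Int) (k : Int) :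
    PySem.Dict Char Int × PySem.Dict Char Int :=
  (o.1.insert (PySem.List.pyGetD subA k ' ') (o.1.getD (PySem.List.pyGetD subA k ' ') 0 + 1),
   o.2.insert (PySem.List.pyGetD subB k ' ') (o.2.getD (PySem.List.pyGetD subB k ' ') 0 + 1))

def solutionBodyA (A B : List String) (st : Int × List Char × List Char) (j : Int) :
    Int × List Char × List Char :=
  let subA := st.2.1 ++ (PySem.List.pyGetD A j "").toList
  let subB := st.2.2 ++ (PySem.List.pyGetD B j "").toList
  let objs := (PySem.List.pyRange 0 (PySem.List.len subA)).foldl (solutionKStep subA subB)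
    (PySem.Dict.empty, PySem.Dict.empty)
  let isCorresponding := ((PySem.Set.ofList objs.1.keys).union (PySem.Set.ofList objs.2.keys)).all
    (fun c => objs.1.getD c 0 == objs.2.getD c 0)
  ((if isCorresponding then st.1 + 1 else st.1), subA, subB)

def solutionOuterA (A B : List String) (counter : Int) (i : Int) : Int :=
  let subA := (PySem.List.pyGetD A i "").toList
  let subB := (PySem.List.pyGetD B i "").toList
  let counter := if subA = subB then counter + 1 else counter
  ((PySem.List.pyRange (i + 1) (PySem.List.len A)).foldl (solutionBodyA A B) (counter, subA, subB)).1

def solution (A : List String) (B : List String) : Int :=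
  (PySem.List.pyRange 0 (PySem.List.len A)).foldl (solutionOuterA A B) 0

-- ===== PORT B =====
-- Literal port of Source B; loop bodies are named helpers.  Loop state is (count, diff, bad, pos).
def solutionIncStep (db : PySem.Dict Char Int × Int) (c : Char) : PySem.Dict Char Int × Int :=
  let v := db.1.getD c 0 + 1
  (db.1.insert c v, if v = 0 then db.2 - 1 else if v = 1 then db.2 + 1 else db.2)

def solutionDecStep (db : PySem.Dict Char Int × Int) (c : Char) : PySem.Dict Char Int × Int :=
  let v := db.1.getD c 0 - 1
  (db.1.insert c v, if v = 0 then db.2 - 1 else if v = -1 then db.2 + 1 else db.2)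

def solutionBodyB (A : List String) (btail : List Char) (i : Int)
    (st : Int × PySem.Dict Char Int × Int × Int) (j : Int) :
    Int × PySem.Dict Char Int × Int × Int :=
  let db := ((PySem.List.pyGetD A j "").toList).foldl solutionIncStep (st.2.1, st.2.2.1)
  let newPos := st.2.2.2 + PySem.List.len (PySem.List.pyGetD A j "").toList
  let db2 := (PySem.List.slice btail (some st.2.2.2) (some newPos)).foldl solutionDecStep db
  ((if i < j ∧ db2.2 = 0 then st.1 + 1 else st.1), db2.1, db2.2, newPos)

def solutionOuterB (A B : List String) (count : Int) (i : Int) : Int :=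
  let count := if PySem.List.pyGetD A i "" = PySem.List.pyGetD B i "" then count + 1 else count
  let btail := (PySem.Str.join "" (PySem.List.slice B (some i) none)).toList
  ((PySem.List.pyRange i (PySem.List.len A)).foldl (solutionBodyB A btail i)
    (count, PySem.Dict.empty, 0, 0)).1

def solution_alt (A : List String) (B : List String) : Int :=
  (PySem.List.pyRange 0 (PySem.List.len A)).foldl (solutionOuterB A B) 0

-- ===== PRECONDITION & SPEC =====
def pvLenSum (l : List String) : Nat := (l.map (fun s => s.toList.length)).sum

-- Pre_ excludes exactly the inputs on which A raises IndexError (no input on which A returns is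
-- excluded): B must have at least as many fragments as A, and every window A[i..j] with i < j
-- must have at most as many characters as the window B[i..j].
def Pre_solution (A : List String) (B : List String) : Prop :=
  A.length ≤ B.length ∧
  ∀ j < A.length, ∀ i < j,
    pvLenSum ((A.drop i).take (j - i + 1)) ≤ pvLenSum ((B.drop i).take (j - i + 1))
instance (A : List String) (B : List String) : Decidable (Pre_solution A B) := by unfold Pre_solution; infer_instance
def pvWitness_solution : List String × List String := (["ab", "c"], ["ba", "c"])

def Spec_solution (A : List String) (B : List String) (out : Int) : Prop := out = solution_alt A B
instance (A : List String) (B : List String) (out : Int) : Decidable (Spec_solution A B out) := by unfold Spec_solution; infer_instance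

-- ===== CLAIM (what is proved, stated in full; the proofs are below) =====
def Claim_equal_solution : Prop := ∀ (A : List String) (B : List String), Dom_solution A B → Pre_solution A B → Spec_solution A B (solution A B)

-- ===== LEMMAS AND PROOFS =====

-- proof-side abbreviations: the concatenation of the window L[i..j] and of the tail L[i:], as char lists
def pvCat (L : List String) (i j : Nat) : List Char :=
  (((L.drop i).take (j + 1 - i)).map String.toList).flatten
def pvTail (L : List String) (i : Nat) : List Char := ((L.drop i).map String.toList).flatten
-- the from-scratch character counter A builds, and B's invariant
def pvCnt (x : List Char) : PySem.Dict Char Int :=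
  x.foldl (fun d c => d.insert c (d.getD c 0 + 1)) PySem.Dict.empty
def pvNz (d : PySem.Dict Char Int) : Int :=
  ((d.keys.filter (fun c => !(d.getD c 0 == 0))).length : Int)
def pvInv (x y : List Char) (d : PySem.Dict Char Int) (bad : Int) : Prop :=
  d.keys.Nodup ∧ (∀ c, d.getD c 0 = (x.count c : Int) - (y.count c : Int)) ∧ bad = pvNz d

lemma pv_intercalate_nil (l : List (List Char)) : List.intercalate [] l = l.flatten := by
  induction l with
  | nil => rfl
  | cons h t ih => simp [List.intercalate] at ih ⊢; cases t <;> simp_all [List.intersperse]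

-- A's k-loop builds the two counters of subA and of the length-matched prefix of subB
lemma pvCat_self (L : List String) (i : Nat) (h : i < L.length) :
    pvCat L i i = (L[i]).toList := by
  unfold pvCat
  have h1 : i + 1 - i = 1 := by omega
  rw [h1, List.take_one]
  have : (L.drop i).head? = some L[i] := by
    rw [List.head?_drop]; simp [List.getElem?_eq_getElem h]
  simp [this]

lemma pvCat_succ (L : List String) (i j : Nat) (hij : i ≤ j) (h : j + 1 < L.length) :
    pvCat L i (j + 1) = pvCat L i j ++ (L[j + 1]).toList := by
  unfold pvCat
  have h1 : j + 1 + 1 - i = (j + 1 - i) + 1 := by omega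
  rw [h1, List.take_succ]
  have hlt : i + (j + 1 - i) = j + 1 := by omega
  have : (L.drop i)[j + 1 - i]? = some L[j + 1] := by
    rw [List.getElem?_drop, hlt, List.getElem?_eq_getElem h]
  simp [this]

lemma pvCat_len (L : List String) (i j : Nat) (hij : i ≤ j) :
    (pvCat L i j).length = pvLenSum ((L.drop i).take (j - i + 1)) := by
  unfold pvCat pvLenSum
  have : j + 1 - i = j - i + 1 := by omega
  rw [this, List.length_flatten, List.map_map]
  rfl

lemma pvCat_prefix_tail (L : List String) (i j : Nat) (n : Nat)
    (hn : n ≤ (pvCat L i j).length) :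
    (pvTail L i).take n = (pvCat L i j).take n := by
  unfold pvCat pvTail at *
  conv_lhs => rw [← List.take_append_drop (j + 1 - i) (L.drop i)]
  rw [List.map_append, List.flatten_append, List.take_append_of_le_length hn]

lemma pvTail_eq (B : List String) (i : Nat) :
    (PySem.Str.join "" (PySem.List.slice B (some (i : Int)) none)).toList = pvTail B i := by
  rw [PySem.Str.toList_join, PySem.List.slice_from_natCast]
  show PySem.Chars.join "".toList _ = _
  have : "".toList = [] := rfl
  rw [this]
  show List.intercalate [] _ = _
  rw [pv_intercalate_nil]
  rfl

lemma pv_kfold (x y : List Char) (h : x.length ≤ y.length) :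
    (PySem.List.pyRange 0 (PySem.List.len x)).foldl (solutionKStep x y)
      (PySem.Dict.empty, PySem.Dict.empty)
    = (pvCnt x, pvCnt (y.take x.length)) := by
  set l := x.zip (y.take x.length) with hl
  have hyl : (y.take x.length).length = x.length := by simp; omega
  have hll : l.length = x.length := by simp [hl]; omega
  have h1 : PySem.List.len x = PySem.List.len l := by
    rw [PySem.List.len_eq, PySem.List.len_eq, hll]
  rw [h1]
  have h2 : ∀ (o : PySem.Dict Char Int × PySem.Dict Char Int),
      ∀ k ∈ PySem.List.pyRange 0 (PySem.List.len l),
      solutionKStep x y o k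
      = (fun (o : PySem.Dict Char Int × PySem.Dict Char Int) (p : Char × Char) =>
          (o.1.insert p.1 (o.1.getD p.1 0 + 1), o.2.insert p.2 (o.2.getD p.2 0 + 1))) o
          (PySem.List.pyGetD l k (' ', ' ')) := by
    intro o k hk
    rw [PySem.List.len_eq, PySem.List.mem_pyRange_one] at hk
    obtain ⟨hk0, hk1⟩ := hk
    have hkx : k < (x.length : Int) := by rw [hll] at hk1; exact hk1
    have hky : k < ((y.take x.length).length : Int) := by omega
    simp only [solutionKStep]
    rw [PySem.List.pyGetD_eq_getElem l (' ', ' ') hk0 hk1,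
        PySem.List.pyGetD_eq_getElem x ' ' hk0 hkx]
    have : PySem.List.pyGetD y k ' ' = y[k.toNat]'(by omega) := by
      refine PySem.List.pyGetD_eq_getElem y ' ' hk0 ?_
      simp at hyl ⊢; omega
    rw [this]
    simp only [hl, List.getElem_zip, List.getElem_take]
  rw [PySem.List.foldl_congr_mem _ _ _ _ h2]
  have h3 := PySem.List.foldl_pyRange_pyGetD l (' ', ' ')
    (fun (o : PySem.Dict Char Int × PySem.Dict Char Int) (p : Char × Char) =>
      (o.1.insert p.1 (o.1.getD p.1 0 + 1), o.2.insert p.2 (o.2.getD p.2 0 + 1)))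
    (PySem.Dict.empty, PySem.Dict.empty) (le_refl 0)
  rw [h3, Int.toNat_zero, List.drop_zero]
  have h4 := PySem.List.foldl_prod_mk
    (fun (d : PySem.Dict Char Int) (p : Char × Char) => d.insert p.1 (d.getD p.1 0 + 1))
    (fun (d : PySem.Dict Char Int) (p : Char × Char) => d.insert p.2 (d.getD p.2 0 + 1))
    l PySem.Dict.empty PySem.Dict.empty
  rw [h4]
  simp only [pvCnt]
  congr 1
  · conv_rhs => rw [← List.map_fst_zip (l₁ := x) (l₂ := y.take x.length) (by omega), ← hl, List.foldl_map]
  · conv_rhs => rw [← List.map_snd_zip (l₁ := x) (l₂ := y.take x.length) (by omega), ← hl, List.foldl_map]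

-- A's is_corresponding check on the two counters is multiset equality of the char lists
lemma pvCnt_getD (x : List Char) (c : Char) : (pvCnt x).getD c 0 = (x.count c : Int) := by
  unfold pvCnt
  rw [PySem.Dict.getD_foldl_insert_add_one]
  simp [PySem.Dict.empty]
  rfl

lemma pvCnt_mem_keys (x : List Char) (c : Char) : c ∈ (pvCnt x).keys ↔ c ∈ x := by
  unfold pvCnt
  rw [PySem.Dict.keys_foldl_insert]
  have hk : (PySem.Dict.empty : PySem.Dict Char Int).keys = [] := rfl
  rw [hk, PySem.Set.mem_update]
  simp

lemma pv_Acheck (x z : List Char) :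
    ((((PySem.Set.ofList (pvCnt x).keys).union (PySem.Set.ofList (pvCnt z).keys)).all
      (fun c => (pvCnt x).getD c 0 == (pvCnt z).getD c 0)) = true)
    ↔ ∀ c : Char, x.count c = z.count c := by
  rw [List.all_eq_true]
  constructor
  · intro hall c
    by_cases hc : c ∈ x ∨ c ∈ z
    · have hmem : c ∈ (PySem.Set.ofList (pvCnt x).keys).union (PySem.Set.ofList (pvCnt z).keys) := by
        rw [PySem.Set.mem_union, PySem.Set.mem_ofList, PySem.Set.mem_ofList,
            pvCnt_mem_keys, pvCnt_mem_keys]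
        exact hc
      have := hall c hmem
      rw [pvCnt_getD, pvCnt_getD, beq_iff_eq] at this
      exact_mod_cast this
    · push_neg at hc
      rw [List.count_eq_zero_of_not_mem hc.1, List.count_eq_zero_of_not_mem hc.2]
  · intro hcnt c _
    rw [pvCnt_getD, pvCnt_getD, beq_iff_eq]
    exact_mod_cast hcnt c

lemma pv_countP_change (l : List Char) (hl : l.Nodup) (c : Char) (hc : c ∈ l)
    (p q : Char → Bool) (hpq : ∀ x ∈ l, x ≠ c → p x = q x) :
    (l.countP q : Int) = (l.countP p : Int) - (if p c then 1 else 0) + (if q c then 1 else 0) := by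
  induction l with
  | nil => cases hc
  | cons a t ih =>
    rw [List.nodup_cons] at hl
    rcases List.mem_cons.mp hc with rfl | ht
    · have hcongr : ∀ x ∈ t, p x = q x := fun x hx =>
        hpq x (List.mem_cons_of_mem _ hx) (fun h => hl.1 (h ▸ hx))
      have heq : List.countP q t = List.countP p t :=
        List.countP_congr (fun x hx => by simp [hcongr x hx])
      rw [List.countP_cons, List.countP_cons, heq]
      by_cases hp : p c <;> by_cases hq : q c <;> simp [hp, hq] <;> omega
    · have hac : a ≠ c := fun h => hl.1 (h ▸ ht)
      have := ih hl.2 ht (fun x hx hxc => hpq x (List.mem_cons_of_mem _ hx) hxc)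
      rw [List.countP_cons, List.countP_cons, hpq a List.mem_cons_self hac]
      push_cast
      push_cast at this
      omega

lemma pvNz_insert (d : PySem.Dict Char Int) (hnd : d.keys.Nodup) (c : Char) (v : Int) :
    pvNz (d.insert c v)
    = pvNz d - (if d.getD c 0 = 0 then 0 else 1) + (if v = 0 then 0 else 1) := by
  by_cases hc : d.contains c = true
  · have hmem : c ∈ d.keys := (PySem.Dict.contains_iff_mem_keys d c).mp hc
    unfold pvNz
    rw [PySem.Dict.keys_insert_of_contains d v hc]
    rw [← List.countP_eq_length_filter, ← List.countP_eq_length_filter]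
    have hch := pv_countP_change d.keys hnd c hmem
      (fun x => !(d.getD x 0 == 0)) (fun x => !((d.insert c v).getD x 0 == 0))
      (fun x _ hxc => by simp only []; rw [PySem.Dict.getD_insert, if_neg hxc])
    rw [hch]
    have hcv : (d.insert c v).getD c 0 = v := by rw [PySem.Dict.getD_insert, if_pos rfl]
    by_cases hg : d.getD c 0 = 0 <;> by_cases hv : v = 0 <;> simp [hg, hv, hcv] <;> omega
  · have hc' : d.contains c = false := by simpa using hc
    have hmem : c ∉ d.keys := fun h => by
      rw [(PySem.Dict.contains_iff_mem_keys d c).mpr h] at hc'; cases hc'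
    have hg : d.getD c 0 = 0 := PySem.Dict.getD_of_not_contains d 0 hc'
    unfold pvNz
    rw [PySem.Dict.keys_insert_of_not_contains d v hc']
    rw [List.filter_append]
    have hcongr : ∀ x ∈ d.keys, (!((d.insert c v).getD x 0 == 0)) = (!(d.getD x 0 == 0)) := by
      intro x hx
      have hxc : x ≠ c := fun h => hmem (h ▸ hx)
      rw [PySem.Dict.getD_insert, if_neg hxc]
    rw [List.filter_congr hcongr]
    have hcv : (d.insert c v).getD c 0 = v := by rw [PySem.Dict.getD_insert, if_pos rfl]
    by_cases hv : v = 0 <;>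
      simp [hcv, hv, hg, List.length_append]

lemma pv_inc_step (x y : List Char) (d : PySem.Dict Char Int) (bad : Int) (c : Char)
    (h : pvInv x y d bad) :
    pvInv (x ++ [c]) y (solutionIncStep (d, bad) c).1 (solutionIncStep (d, bad) c).2 := by
  obtain ⟨hnd, hg, hb⟩ := h
  simp only [solutionIncStep]
  refine ⟨PySem.Dict.nodup_keys_insert d c _ hnd, ?_, ?_⟩
  · intro c'
    rw [PySem.Dict.getD_insert]
    by_cases hcc : c' = c
    · subst hcc
      simp only [if_pos rfl]
      rw [hg c']
      simp [List.count_append]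
      omega
    · rw [if_neg hcc, hg c']
      simp [List.count_append, List.count_singleton, hcc]
      intro h'; exact absurd h'.symm hcc
  · rw [pvNz_insert d hnd, ← hb]
    by_cases h0 : d.getD c 0 + 1 = 0
    · have : ¬ d.getD c 0 = 0 := by omega
      simp [h0, this]
    · by_cases h1 : d.getD c 0 + 1 = 1
      · have : d.getD c 0 = 0 := by omega
        simp [h0, h1, this]
      · have : ¬ d.getD c 0 = 0 := by omega
        simp [h0, h1, this]

lemma pv_dec_step (x y : List Char) (d : PySem.Dict Char Int) (bad : Int) (c : Char)
    (h : pvInv x y d bad) :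
    pvInv x (y ++ [c]) (solutionDecStep (d, bad) c).1 (solutionDecStep (d, bad) c).2 := by
  obtain ⟨hnd, hg, hb⟩ := h
  simp only [solutionDecStep]
  refine ⟨PySem.Dict.nodup_keys_insert d c _ hnd, ?_, ?_⟩
  · intro c'
    rw [PySem.Dict.getD_insert]
    by_cases hcc : c' = c
    · subst hcc
      simp only [if_pos rfl]
      rw [hg c']
      simp [List.count_append]
      omega
    · rw [if_neg hcc, hg c']
      simp [List.count_append, List.count_singleton, hcc]
      intro h'; exact absurd h'.symm hcc
  · rw [pvNz_insert d hnd, ← hb]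
    by_cases h0 : d.getD c 0 - 1 = 0
    · have : ¬ d.getD c 0 = 0 := by omega
      simp [h0, this]
    · by_cases h1 : d.getD c 0 - 1 = -1
      · have : d.getD c 0 = 0 := by omega
        simp [h0, h1, this]
      · have : ¬ d.getD c 0 = 0 := by omega
        simp [h0, h1, this]

lemma pv_inc_inv (z : List Char) : ∀ (x y : List Char) (d : PySem.Dict Char Int) (bad : Int),
    pvInv x y d bad →
    pvInv (x ++ z) y (z.foldl solutionIncStep (d, bad)).1 (z.foldl solutionIncStep (d, bad)).2 := by
  induction z with
  | nil => intro x y d bad h; simpa using h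
  | cons a t ih =>
    intro x y d bad h
    have h1 := pv_inc_step x y d bad a h
    have h2 := ih (x ++ [a]) y (solutionIncStep (d, bad) a).1 (solutionIncStep (d, bad) a).2 h1
    simpa [List.append_assoc] using h2

lemma pv_dec_inv (z : List Char) : ∀ (x y : List Char) (d : PySem.Dict Char Int) (bad : Int),
    pvInv x y d bad →
    pvInv x (y ++ z) (z.foldl solutionDecStep (d, bad)).1 (z.foldl solutionDecStep (d, bad)).2 := by
  induction z with
  | nil => intro x y d bad h; simpa using h
  | cons a t ih =>
    intro x y d bad h
    have h1 := pv_dec_step x y d bad a h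
    have h2 := ih x (y ++ [a]) (solutionDecStep (d, bad) a).1 (solutionDecStep (d, bad) a).2 h1
    simpa [List.append_assoc] using h2

lemma pv_bad_zero (x y : List Char) (d : PySem.Dict Char Int) (bad : Int) (h : pvInv x y d bad) :
    bad = 0 ↔ ∀ c : Char, x.count c = y.count c := by
  obtain ⟨hnd, hg, hb⟩ := h
  rw [hb]
  unfold pvNz
  constructor
  · intro h0 c
    have hf : List.filter (fun c => !(d.getD c 0 == 0)) d.keys = [] := by
      have := Int.ofNat.inj h0
      exact List.length_eq_zero_iff.mp this
    have hz : ∀ c : Char, d.getD c 0 = 0 := by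
      intro c'
      by_cases hm : c' ∈ d.keys
      · have := List.filter_eq_nil_iff.mp hf c' hm
        simpa using this
      · refine PySem.Dict.getD_of_not_contains d 0 ?_
        by_contra hcon
        exact hm ((PySem.Dict.contains_iff_mem_keys d c').mp (by simpa using hcon))
    have := hg c
    rw [hz c] at this
    omega
  · intro hcnt
    have hz : ∀ c : Char, d.getD c 0 = 0 := by
      intro c; rw [hg c, hcnt c]; omega
    have : List.filter (fun c => !(d.getD c 0 == 0)) d.keys = [] := by
      apply List.filter_eq_nil_iff.mpr
      intro c _
      simp [hz c]
    rw [this]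
    rfl

-- the simulation of A's inner loop by B's inner loop from a coupled pair of states
lemma pv_inner_sim (A B : List String) (hP : Pre_solution A B) (i : Nat) :
    ∀ (m j₀ : Nat), i ≤ j₀ → j₀ + 1 + m = A.length →
    ∀ (c : Int) (d : PySem.Dict Char Int) (bad : Int),
    pvInv (pvCat A i j₀) ((pvTail B i).take (pvCat A i j₀).length) d bad →
    ((PySem.List.pyRange (↑(j₀ + 1)) (PySem.List.len A)).foldl (solutionBodyA A B)
        (c, pvCat A i j₀, pvCat B i j₀)).1
    = ((PySem.List.pyRange (↑(j₀ + 1)) (PySem.List.len A)).foldl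
        (solutionBodyB A (pvTail B i) (↑i)) (c, d, bad, ((pvCat A i j₀).length : Int))).1 := by
  intro m
  induction m with
  | zero =>
    intro j0 hij hlen c d bad hInv
    have hnil : PySem.List.pyRange (↑(j0 + 1)) (PySem.List.len A) = [] := by
      apply PySem.List.pyRange_one_eq_nil
      rw [PySem.List.len_eq]
      exact_mod_cast Nat.le_of_eq (by omega)
    rw [hnil]
    rfl
  | succ m ih =>
    intro j0 hij hlen c d bad hInv
    set t := j0 + 1 with htdef
    have htA : t < A.length := by omega
    have htB : t < B.length := by have := hP.1; omega
    have hcons : PySem.List.pyRange (↑t) (PySem.List.len A) =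
        (↑t : Int) :: PySem.List.pyRange ((↑t : Int) + 1) (PySem.List.len A) := by
      apply PySem.List.pyRange_one_cons
      rw [PySem.List.len_eq]
      exact_mod_cast htA
    have hcast : ((↑t : Int) + 1) = ((↑(t + 1) : Nat) : Int) := by push_cast; ring
    have ha : PySem.List.pyGetD A (↑t) "" = A[t] := by
      apply PySem.List.pyGetD_eq_getElem A "" (by positivity)
      exact_mod_cast htA
    have hb : PySem.List.pyGetD B (↑t) "" = B[t] := by
      apply PySem.List.pyGetD_eq_getElem B "" (by positivity)
      exact_mod_cast htB
    have hcatA : pvCat A i j0 ++ (A[t]).toList = pvCat A i t :=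
      (pvCat_succ A i j0 hij htA).symm
    have hcatB : pvCat B i j0 ++ (B[t]).toList = pvCat B i t :=
      (pvCat_succ B i j0 hij htB).symm
    have hit : i < t := by omega
    have hlenAB : (pvCat A i t).length ≤ (pvCat B i t).length := by
      rw [pvCat_len A i t (by omega), pvCat_len B i t (by omega)]
      exact hP.2 t htA i hit
    -- B: incorporate A[t]'s chars
    set p := (pvCat A i j0).length with hpdef
    set p' := (pvCat A i t).length with hp'def
    have hpp' : p + (A[t]).toList.length = p' := by
      rw [hp'def, ← hcatA, List.length_append]
    set db := ((A[t]).toList).foldl solutionIncStep (d, bad) with hdbdef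
    have hInv1 : pvInv (pvCat A i t) ((pvTail B i).take p) db.1 db.2 := by
      rw [← hcatA]
      exact pv_inc_inv _ _ _ _ _ hInv
    have hslice : PySem.List.slice (pvTail B i) (some ((↑p : Nat) : Int)) (some ((↑p' : Nat) : Int))
        = ((pvTail B i).drop p).take (p' - p) := PySem.List.slice_natCast _ _ _
    set db2 := (((pvTail B i).drop p).take (p' - p)).foldl solutionDecStep db with hdb2def
    have hInv2 : pvInv (pvCat A i t) ((pvTail B i).take p') db2.1 db2.2 := by
      have h2 := pv_dec_inv (((pvTail B i).drop p).take (p' - p)) _ _ _ _ hInv1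
      have htake : (pvTail B i).take p ++ ((pvTail B i).drop p).take (p' - p)
          = (pvTail B i).take p' := by
        rw [← List.take_add]
        congr 1
        omega
      rwa [htake] at h2
    -- the two conditions agree
    have hcondB : (db2.2 = 0) ↔
        (∀ ch : Char, (pvCat A i t).count ch = ((pvCat B i t).take p').count ch) := by
      rw [pv_bad_zero _ _ _ _ hInv2]
      rw [pvCat_prefix_tail B i t p' (by omega)]
    have hcondA : ((((PySem.Set.ofList (pvCnt (pvCat A i t)).keys).union
          (PySem.Set.ofList (pvCnt ((pvCat B i t).take p')).keys)).all
          (fun ch => (pvCnt (pvCat A i t)).getD ch 0 == (pvCnt ((pvCat B i t).take p')).getD ch 0)) = true)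
        ↔ (∀ ch : Char, (pvCat A i t).count ch = ((pvCat B i t).take p').count ch) :=
      pv_Acheck _ _
    -- one step of each loop
    have hstepA : solutionBodyA A B (c, pvCat A i j0, pvCat B i j0) (↑t)
        = ((if (((PySem.Set.ofList (pvCnt (pvCat A i t)).keys).union
            (PySem.Set.ofList (pvCnt ((pvCat B i t).take p')).keys)).all
            (fun ch => (pvCnt (pvCat A i t)).getD ch 0 == (pvCnt ((pvCat B i t).take p')).getD ch 0))
            then c + 1 else c), pvCat A i t, pvCat B i t) := by
      simp only [solutionBodyA, ha, hb, hcatA, hcatB]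
      rw [pv_kfold _ _ hlenAB]
    have hstepB : solutionBodyB A (pvTail B i) (↑i) (c, d, bad, ((p : Nat) : Int)) (↑t)
        = ((if ((↑i : Int) < ↑t ∧ db2.2 = 0) then c + 1 else c), db2.1, db2.2, ((p' : Nat) : Int)) := by
      have hpos : ((p : Nat) : Int) + ((A[t]).toList.length : Int) = ((p' : Nat) : Int) := by
        push_cast; omega
      simp only [solutionBodyB, ha, PySem.List.len_eq, hslice, ← hdbdef, ← hdb2def, hpos]
    rw [hcons, List.foldl_cons, List.foldl_cons, hstepA, hstepB, hcast]
    have hnext := ih t (by omega) (by omega)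
    by_cases hcond : ∀ ch : Char, (pvCat A i t).count ch = ((pvCat B i t).take p').count ch
    · rw [if_pos (hcondA.mpr hcond), if_pos ⟨by exact_mod_cast hit, hcondB.mpr hcond⟩]
      exact hnext (c + 1) db2.1 db2.2 hInv2
    · rw [if_neg (fun h => hcond (hcondA.mp h)), if_neg (fun h => hcond (hcondB.mp h.2))]
      exact hnext c db2.1 db2.2 hInv2

lemma pvInv_empty : pvInv [] [] PySem.Dict.empty 0 := by
  refine ⟨?_, fun c => ?_, ?_⟩
  · show ([] : List Char).Nodup
    exact List.nodup_nil
  · show (0 : Int) = _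
    simp
  · rfl

lemma pv_outer (A B : List String) (hP : Pre_solution A B) (count : Int) (i : Int)
    (hi : i ∈ PySem.List.pyRange 0 (PySem.List.len A)) :
    solutionOuterA A B count i = solutionOuterB A B count i := by
  rw [PySem.List.len_eq, PySem.List.mem_pyRange_one] at hi
  obtain ⟨hi0, hi1⟩ := hi
  lift i to ℕ using hi0 with i₀
  have hiA : i₀ < A.length := by exact_mod_cast hi1
  have hiB : i₀ < B.length := by have := hP.1; omega
  have ha : PySem.List.pyGetD A (↑i₀) "" = A[i₀] :=
    PySem.List.pyGetD_eq_getElem A "" (by positivity) (by exact_mod_cast hiA)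
  have hb : PySem.List.pyGetD B (↑i₀) "" = B[i₀] :=
    PySem.List.pyGetD_eq_getElem B "" (by positivity) (by exact_mod_cast hiB)
  have hdiag : ((A[i₀]).toList = (B[i₀]).toList) ↔ (A[i₀] = B[i₀]) :=
    ⟨fun h => String.toList_inj.mp h, fun h => h ▸ rfl⟩
  unfold solutionOuterA solutionOuterB
  rw [ha, hb, pvTail_eq]
  simp only [hdiag]
  set count' := if A[i₀] = B[i₀] then count + 1 else count with hcount'
  -- first iteration of B's loop (j = i) builds the invariant state
  have hconsB : PySem.List.pyRange (↑i₀) (PySem.List.len A)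
      = (↑i₀ : Int) :: PySem.List.pyRange ((↑i₀ : Int) + 1) (PySem.List.len A) := by
    apply PySem.List.pyRange_one_cons
    rw [PySem.List.len_eq]
    exact_mod_cast hiA
  rw [hconsB, List.foldl_cons]
  set z := (A[i₀]).toList with hz
  set db := z.foldl solutionIncStep (PySem.Dict.empty, 0) with hdb
  have hInv1 : pvInv z [] db.1 db.2 := by
    have := pv_inc_inv z [] [] PySem.Dict.empty 0 pvInv_empty
    simpa using this
  have hslice : PySem.List.slice (pvTail B i₀) (some ((0:Nat) : Int)) (some ((z.length : Nat) : Int))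
      = ((pvTail B i₀).drop 0).take (z.length - 0) := PySem.List.slice_natCast _ _ _
  set db2 := (((pvTail B i₀).take z.length)).foldl solutionDecStep db with hdb2
  have hInv2 : pvInv z ((pvTail B i₀).take z.length) db2.1 db2.2 := by
    have := pv_dec_inv ((pvTail B i₀).take z.length) z [] db.1 db.2 hInv1
    simpa using this
  have hstepB : solutionBodyB A (pvTail B i₀) (↑i₀) (count', PySem.Dict.empty, 0, 0) (↑i₀)
      = (count', db2.1, db2.2, ((z.length : Nat) : Int)) := by
    have h00 : ((0:Nat) : Int) = (0 : Int) := rfl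
    have hzz : (0 : Int) + PySem.List.len z = ((z.length : Nat) : Int) := by
      rw [PySem.List.len_eq]; omega
    simp only [solutionBodyB, ha, ← hz, hzz]
    rw [show (some (0 : Int)) = some ((0:Nat) : Int) from rfl, hslice]
    simp only [List.drop_zero, Nat.sub_zero, ← hdb, ← hdb2]
    have : ¬ ((↑i₀ : Int) < ↑i₀ ∧ ((pvTail B i₀).take z.length |>.foldl solutionDecStep db).2 = 0) := by
      intro h; exact absurd h.1 (by omega)
    rw [if_neg this]
  rw [hstepB]
  -- now both inner loops run over pyRange (i₀+1) n from coupled states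
  have hcatAi : pvCat A i₀ i₀ = z := pvCat_self A i₀ hiA
  have hcatBi : pvCat B i₀ i₀ = (B[i₀]).toList := pvCat_self B i₀ hiB
  have hcast : ((↑i₀ : Int) + 1) = ((↑(i₀ + 1) : Nat) : Int) := by push_cast; ring
  rw [hcast]
  have hsim := pv_inner_sim A B hP i₀ (A.length - (i₀ + 1)) i₀ (le_refl i₀) (by omega)
      count' db2.1 db2.2 (by rw [hcatAi]; exact hInv2)
  rw [hcatAi, hcatBi] at hsim
  exact hsim

-- ===== VERDICT (by name: the statement is the Claim_ definition above) =====
theorem solution_spec : Claim_equal_solution := by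
  intro A B _ hP
  unfold Spec_solution solution solution_alt
  exact PySem.List.foldl_congr_mem _ _ _ 0 (fun c i hi => pv_outer A B hP c i hi)
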